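-- pv_equiv track=rewrite | github.com/ishangote/Coding-Interviews-Python | Leetcode/1424 Diagonal Traverse II/diagonal_traverse_ii.py | diagonal_traverse_ii_hash_map
-- ===== SOURCE A (Python) =====
-- from collections import defaultdict, deque
--
-- def diagonal_traverse_ii_hash_map(nums):
--     diagonal_elements = defaultdict(list)
--     max_diagonal_key = 0
--
--     for row in range(len(nums) - 1, -1, -1):
--         for col in range(len(nums[row]) - 1, -1, -1):
--             max_diagonal_key = max(max_diagonal_key, row + col)
--             diagonal_elements[row + col].append(nums[row][col])
--
--     res = []
--     for key in range(0, max_diagonal_key + 1):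
--         res.extend(diagonal_elements[key])
--
--     return res
-- ===== SOURCE B (Python) =====
-- def diagonal_traverse_ii_hash_map(nums):
--     entries = [(r + c, -r, v)
--                for r, row in enumerate(nums)
--                for c, v in enumerate(row)]
--     entries.sort(key=lambda t: (t[0], t[1]))
--     return [t[2] for t in entries]
-- ===== Notes on version B (the rewrite author's own statement) =====
-- stated objective: alternative
-- what changed: Replaces the defaultdict bucketing with max-key tracking and a separate concatenation loop by building one flat list of (diagonal, -row, value) tuples in natural row-major order and stably sorting it by (diagonal, -row), then projecting out the values.
import Mathlib
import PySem

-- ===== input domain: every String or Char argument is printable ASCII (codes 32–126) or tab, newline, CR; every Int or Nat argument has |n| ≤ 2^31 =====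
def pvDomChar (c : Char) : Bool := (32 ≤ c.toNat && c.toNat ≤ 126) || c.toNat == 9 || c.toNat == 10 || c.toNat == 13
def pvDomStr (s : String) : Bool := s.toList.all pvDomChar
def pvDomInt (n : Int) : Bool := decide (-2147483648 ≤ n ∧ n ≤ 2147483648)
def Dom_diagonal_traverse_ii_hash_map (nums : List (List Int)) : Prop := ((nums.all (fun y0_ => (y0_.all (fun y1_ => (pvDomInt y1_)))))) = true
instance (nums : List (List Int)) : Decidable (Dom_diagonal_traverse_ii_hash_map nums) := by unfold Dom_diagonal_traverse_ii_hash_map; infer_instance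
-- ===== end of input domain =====

-- B replaces A's defaultdict bucketing + max-key tracking + concatenation loop by one
-- stable sort of (diagonal, -row, value) triples; a different algorithm of similar cost.

-- ===== PORT A =====
def diagonal_traverse_ii_hash_map (nums : List (List Int)) : List Int :=
  let st := (PySem.List.pyRange ((nums.length : Int) - 1) (-1) (-1)).foldl
    (fun (st : PySem.Dict Int (List Int) × Int) row =>
      let rowL := PySem.List.pyGetD nums row []
      (PySem.List.pyRange ((rowL.length : Int) - 1) (-1) (-1)).foldl
        (fun st col =>
          (st.1.modify (row + col) [] (· ++ [PySem.List.pyGetD rowL col 0]),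
           max st.2 (row + col)))
        st)
    (PySem.Dict.empty, 0)
  (PySem.List.pyRange 0 (st.2 + 1) 1).foldl (fun res key => res ++ st.1.getD key []) []

-- ===== PORT B =====
def diagonal_traverse_ii_hash_map_alt (nums : List (List Int)) : List Int :=
  let entries := (PySem.List.enumerate nums).flatMap (fun p =>
    (PySem.List.enumerate p.2).map (fun q => (p.1 + q.1, -p.1, q.2)))
  (PySem.List.sorted entries (fun t => toLex (t.1, t.2.1))).map (fun t => t.2.2)

-- ===== PRECONDITION & SPEC =====
def Spec_diagonal_traverse_ii_hash_map (nums : List (List Int)) (out : List Int) : Prop := out = diagonal_traverse_ii_hash_map_alt nums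
instance (nums : List (List Int)) (out : List Int) : Decidable (Spec_diagonal_traverse_ii_hash_map nums out) := by unfold Spec_diagonal_traverse_ii_hash_map; infer_instance

-- ===== CLAIM (what is proved, stated in full; the proofs are below) =====
def Claim_equal_diagonal_traverse_ii_hash_map : Prop := ∀ (nums : List (List Int)), Dom_diagonal_traverse_ii_hash_map nums → Spec_diagonal_traverse_ii_hash_map nums (diagonal_traverse_ii_hash_map nums)

-- ===== LEMMAS AND PROOFS =====

-- the triples B builds, in B's (row-major) construction order
def pvEnt (nums : List (List Int)) : List (Int × Int × Int) :=
  (PySem.List.enumerate nums).flatMap (fun p =>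
    (PySem.List.enumerate p.2).map (fun q => (p.1 + q.1, -p.1, q.2)))

-- the (key, value) pairs in A's (reverse) iteration order
def pvPairs (nums : List (List Int)) : List (Int × Int) :=
  ((pvEnt nums).map (fun t => (t.1, t.2.2))).reverse

-- A's max_diagonal_key
def pvMx (nums : List (List Int)) : Int :=
  ((pvPairs nums).map (fun p => p.1)).foldl max 0

-- A's loop body as one step over (key, value) pairs
def pvStep (st : PySem.Dict Int (List Int) × Int) (kv : Int × Int) :
    PySem.Dict Int (List Int) × Int :=
  (st.1.modify kv.1 [] (· ++ [kv.2]), max st.2 kv.1)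

theorem pv_reverse_flatMap {α β : Type} (l : List α) (g : α → List β) :
    (l.flatMap g).reverse = l.reverse.flatMap (fun x => (g x).reverse) := by
  induction l with
  | nil => simp
  | cons a t ih => simp [List.flatMap_cons, ih]

-- partition of a list into key-blocks is a permutation of the list
theorem pv_partition_perm {α : Type} (key : α → Int) (ks : List Int) (l : List α)
    (hnd : ks.Nodup) (hcov : ∀ x ∈ l, key x ∈ ks) :
    (ks.flatMap (fun k => l.filter (fun x => key x == k))).Perm l := by
  induction ks generalizing l with
  | nil =>
    have : l = [] := List.eq_nil_iff_forall_not_mem.2 (fun x hx => by simpa using hcov x hx)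
    simp [this]
  | cons k ks ih =>
    simp only [List.flatMap_cons]
    have hnd' : ks.Nodup := (List.nodup_cons.1 hnd).2
    have hk : k ∉ ks := (List.nodup_cons.1 hnd).1
    have hblocks : ∀ k' ∈ ks, l.filter (fun x => key x == k')
        = (l.filter (fun x => !(key x == k))).filter (fun x => key x == k') := by
      intro k' hk'
      rw [List.filter_filter]
      apply List.filter_congr
      intro x _
      by_cases h : key x = k'
      · have hne : k' ≠ k := fun he => hk (he ▸ hk')
        simp [h, hne]
      · simp [h]
    have hcov' : ∀ x ∈ l.filter (fun x => !(key x == k)), key x ∈ ks := by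
      intro x hx
      have hm := List.mem_filter.1 hx
      have hin := hcov x hm.1
      simp only [List.mem_cons] at hin
      rcases hin with h | h
      · exact absurd h (by simpa using hm.2)
      · exact h
    have hperm : (ks.flatMap (fun k' => l.filter (fun x => key x == k'))).Perm
        (l.filter (fun x => !(key x == k))) := by
      have hih := ih (l.filter (fun x => !(key x == k))) hnd' hcov'
      have heq : ks.flatMap (fun k' => l.filter (fun x => key x == k'))
          = ks.flatMap (fun k' => (l.filter (fun x => !(key x == k))).filter (fun x => key x == k')) :=
        List.flatMap_congr (fun k' hk' => hblocks k' hk')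
      rw [heq]; exact hih
    exact ((List.Perm.refl _).append hperm).trans (List.filter_append_perm _ l)

-- the inner (column) loop of A is a fold of pvStep over the reversed enumerated row
theorem pv_inner (r : Int) (rowL : List Int) (st : PySem.Dict Int (List Int) × Int) :
    (PySem.List.pyRange ((rowL.length : Int) - 1) (-1) (-1)).foldl
      (fun st col =>
        (st.1.modify (r + col) [] (· ++ [PySem.List.pyGetD rowL col 0]),
         max st.2 (r + col))) st
    = (((PySem.List.enumerate rowL).map (fun q => (r + q.1, q.2))).reverse).foldl pvStep st := by
  have h1 : PySem.List.pyRange ((rowL.length : Int) - 1) (-1) (-1)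
      = (PySem.List.pyRange 0 (rowL.length : Int)).reverse := by
    rw [PySem.List.pyRange_neg_one_eq_reverse]; norm_num
  rw [h1, PySem.List.enumerate_eq_map_pyRange rowL 0, List.map_map, ← List.map_reverse,
    List.foldl_map]
  rfl

-- A's whole accumulation loop is a fold of pvStep over pvPairs
theorem pv_outer (nums : List (List Int)) (init : PySem.Dict Int (List Int) × Int) :
    (PySem.List.pyRange ((nums.length : Int) - 1) (-1) (-1)).foldl
      (fun (st : PySem.Dict Int (List Int) × Int) row =>
        let rowL := PySem.List.pyGetD nums row []
        (PySem.List.pyRange ((rowL.length : Int) - 1) (-1) (-1)).foldl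
          (fun st col =>
            (st.1.modify (row + col) [] (· ++ [PySem.List.pyGetD rowL col 0]),
             max st.2 (row + col)))
          st) init
    = (pvPairs nums).foldl pvStep init := by
  unfold pvPairs pvEnt
  rw [List.map_flatMap]
  simp only [List.map_map]
  rw [pv_reverse_flatMap, List.foldl_flatMap]
  rw [PySem.List.enumerate_eq_map_pyRange nums [], ← List.map_reverse, List.foldl_map]
  have h1 : PySem.List.pyRange ((nums.length : Int) - 1) (-1) (-1)
      = (PySem.List.pyRange 0 (nums.length : Int)).reverse := by
    rw [PySem.List.pyRange_neg_one_eq_reverse]; norm_num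
  rw [h1]
  have hlen : PySem.List.len nums = (nums.length : Int) := rfl
  rw [hlen]
  congr 1
  funext st row
  exact pv_inner row (PySem.List.pyGetD nums row []) st

-- every key that occurs is nonnegative
theorem pv_key_nonneg (nums : List (List Int)) :
    ∀ t ∈ pvEnt nums, 0 ≤ t.1 := by
  intro t ht
  unfold pvEnt at ht
  rcases List.mem_flatMap.1 ht with ⟨p, hp, htp⟩
  rcases List.mem_map.1 htp with ⟨q, hq, rfl⟩
  rcases (PySem.List.mem_enumerate_iff nums 0 p).1 hp with ⟨k, _, rfl⟩
  rcases (PySem.List.mem_enumerate_iff _ 0 q).1 hq with ⟨k', _, rfl⟩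
  simp only []
  omega

-- every key that occurs is bounded by A's max_diagonal_key, which is itself ≥ 0
theorem pv_key_le (nums : List (List Int)) :
    (0 ≤ pvMx nums) ∧ ∀ t ∈ pvEnt nums, t.1 ≤ pvMx nums := by
  unfold pvMx
  constructor
  · exact (PySem.List.le_foldl_max _ 0).1
  · intro t ht
    refine (PySem.List.le_foldl_max _ 0).2 t.1 ?_
    unfold pvPairs
    rw [List.map_reverse, List.mem_reverse, List.map_map]
    exact List.mem_map.2 ⟨t, ht, rfl⟩

-- row-major construction order: -row weakly decreases, and within a row the key strictly increases
theorem pv_ent_pairwise (nums : List (List Int)) :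
    (pvEnt nums).Pairwise
      (fun a b => b.2.1 < a.2.1 ∨ (a.2.1 = b.2.1 ∧ a.1 < b.1)) := by
  unfold pvEnt
  rw [List.pairwise_flatMap]
  constructor
  · intro p _
    rw [List.pairwise_map]
    refine (PySem.List.pairwise_lt_enumerate p.2 0).imp ?_
    intro q1 q2 h
    exact Or.inr ⟨rfl, by omega⟩
  · refine (PySem.List.pairwise_lt_enumerate nums 0).imp ?_
    intro p1 p2 h x hx y hy
    rcases List.mem_map.1 hx with ⟨q1, _, rfl⟩
    rcases List.mem_map.1 hy with ⟨q2, _, rfl⟩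
    exact Or.inl (by simp only []; omega)

-- the sorted order named: blocks of equal diagonal in increasing diagonal order,
-- each block the reverse of construction order
theorem pvB_eq (nums : List (List Int)) :
    diagonal_traverse_ii_hash_map_alt nums
    = ((PySem.List.pyRange 0 (pvMx nums + 1)).flatMap
        (fun k => ((pvEnt nums).filter (fun t => t.1 == k)).reverse)).map (fun t => t.2.2) := by
  show (PySem.List.sorted (pvEnt nums) (fun t => toLex (t.1, t.2.1))).map (fun t => t.2.2) = _
  congr 1
  apply PySem.List.sorted_eq_of_perm_of_pairwise_lt
  · -- permutation
    refine List.Perm.trans ?_ (pv_partition_perm (fun t => t.1) _ (pvEnt nums)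
      (PySem.List.nodup_pyRange_one 0 (pvMx nums + 1)) ?_)
    · exact List.Perm.flatMap_left _ (fun k _ => List.reverse_perm _)
    · intro t ht
      rw [PySem.List.mem_pyRange_one]
      constructor
      · exact pv_key_nonneg nums t ht
      · have h := (pv_key_le nums).2 t ht
        show t.1 < pvMx nums + 1
        omega
  · -- pairwise strictly increasing sort key
    rw [List.pairwise_flatMap]
    constructor
    · intro k _
      rw [List.pairwise_reverse, List.pairwise_filter]
      refine (pv_ent_pairwise nums).imp ?_
      intro a b h ha hb
      rw [Prod.Lex.toLex_lt_toLex]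
      have ha' : a.1 = k := by simpa using ha
      have hb' : b.1 = k := by simpa using hb
      rcases h with h | h
      · exact Or.inr ⟨by rw [ha', hb'], h⟩
      · omega
    · refine (PySem.List.pairwise_lt_pyRange_one 0 (pvMx nums + 1)).imp ?_
      intro k1 k2 hk x hx y hy
      rw [List.mem_reverse, List.mem_filter] at hx hy
      rw [Prod.Lex.toLex_lt_toLex]
      have hx' : x.1 = k1 := by simpa using hx.2
      have hy' : y.1 = k2 := by simpa using hy.2
      exact Or.inl (by omega)

-- A's result in the same normal form
theorem pvA_eq (nums : List (List Int)) :
    diagonal_traverse_ii_hash_map nums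
    = (PySem.List.pyRange 0 (pvMx nums + 1)).flatMap
        (fun k => (((pvEnt nums).filter (fun t => t.1 == k)).reverse).map (fun t => t.2.2)) := by
  show (PySem.List.pyRange 0
      (((PySem.List.pyRange ((nums.length : Int) - 1) (-1) (-1)).foldl _ (PySem.Dict.empty, 0)).2 + 1) 1).foldl _ [] = _
  rw [pv_outer nums (PySem.Dict.empty, 0)]
  rw [show (pvPairs nums).foldl pvStep (PySem.Dict.empty, 0)
      = ((pvPairs nums).foldl (fun d (kv : Int × Int) => d.modify kv.1 [] (· ++ [kv.2])) PySem.Dict.empty,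
         (pvPairs nums).foldl (fun m (kv : Int × Int) => max m kv.1) 0) from
    PySem.List.foldl_prod_mk (f := fun d (kv : Int × Int) => d.modify kv.1 [] (· ++ [kv.2]))
      (g := fun m (kv : Int × Int) => max m kv.1) (pvPairs nums) PySem.Dict.empty 0]
  have hmx : (pvPairs nums).foldl (fun m (kv : Int × Int) => max m kv.1) 0 = pvMx nums := by
    unfold pvMx; rw [List.foldl_map]
  rw [PySem.List.foldl_append_eq_flatMap]
  rw [List.nil_append]
  rw [hmx]
  apply List.flatMap_congr
  intro k _
  rw [PySem.Dict.getD_foldl_modify_append, PySem.Dict.getD_empty, List.nil_append]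
  unfold pvPairs
  rw [List.filter_reverse, List.filter_map, ← List.map_reverse, List.map_map]
  rfl

-- ===== VERDICT (by name: the statement is the Claim_ definition above) =====
theorem diagonal_traverse_ii_hash_map_spec : Claim_equal_diagonal_traverse_ii_hash_map := by
  intro nums _
  unfold Spec_diagonal_traverse_ii_hash_map
  rw [pvA_eq, pvB_eq, List.map_flatMap]
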